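-- pv_equiv track=rewrite | github.com/zakj/adventofcode | py/2025/day03.py | find_highest
-- ===== SOURCE A (Python) =====
-- def find_highest(xs: str, start: int, end: int | None) -> tuple[int, int]:
--     highest = 0
--     index = -1
--     for i, x in enumerate(xs[:end]):
--         if i < start:
--             continue
--         if int(x) > highest:
--             highest = int(x)
--             index = i
--     return highest, index
-- ===== SOURCE B (Python) =====
-- def find_highest(xs: str, start: int, end: int | None) -> tuple[int, int]:
--     # max-then-locate two-pass decomposition instead of a fused tracking scan
--     digits = [(i, int(x)) for i, x in enumerate(xs[:end]) if i >= start]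
--     highest = max((v for _, v in digits), default=0)
--     if highest == 0:
--         return 0, -1
--     return highest, next(i for i, v in digits if v == highest)
-- ===== Notes on version B (the rewrite author's own statement) =====
-- stated objective: alternative
-- what changed: B materialises the region's (index, digit) pairs once, then takes the maximum in one pass and locates its first occurrence in a second pass, instead of A's fused single scan tracking (highest, index); Pre_ excludes inputs whose scanned region contains a non-digit character, on which A raises ValueError.
import Mathlib
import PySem

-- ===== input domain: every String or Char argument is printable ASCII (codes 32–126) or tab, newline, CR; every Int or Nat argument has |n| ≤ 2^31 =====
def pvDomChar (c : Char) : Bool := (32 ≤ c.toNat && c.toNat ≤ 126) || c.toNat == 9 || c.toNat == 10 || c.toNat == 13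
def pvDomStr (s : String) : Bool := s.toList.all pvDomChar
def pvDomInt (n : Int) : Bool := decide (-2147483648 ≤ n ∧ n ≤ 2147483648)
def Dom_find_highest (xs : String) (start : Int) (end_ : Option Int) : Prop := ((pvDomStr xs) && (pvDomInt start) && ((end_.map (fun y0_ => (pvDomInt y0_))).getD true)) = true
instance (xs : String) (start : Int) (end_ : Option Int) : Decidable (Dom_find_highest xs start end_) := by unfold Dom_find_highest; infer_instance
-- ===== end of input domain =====

-- B: max-then-locate two-pass decomposition of A's fused max-tracking scan (alternative structure, same cost).


-- ===== PORT A =====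
-- A's single scan over enumerate(xs[:end]) tracking (highest, index).
-- The `none` branch of the match is unreachable under Pre_find_highest (Python raises ValueError there).
def find_highest (xs : String) (start : Int) (end_ : Option Int) : Int × Int :=
  (PySem.List.enumerate (PySem.List.slice xs.toList none end_) 0).foldl
    (fun (st : Int × Int) p =>
      if p.1 < start then st
      else
        match PySem.Int.ofStr? (String.singleton p.2) with
        | some v => if v > st.1 then (v, p.1) else st
        | none => st)
    (0, -1)

-- ===== PORT B =====
-- B: build the region's (index, digit) list once, take the max (default 0), then locate its first occurrence.
-- `.getD 0` / `.getD (-1)` are unreachable defaults under Pre_find_highest (int(x) raises / next always finds).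
def find_highest_alt (xs : String) (start : Int) (end_ : Option Int) : Int × Int :=
  let digits := ((PySem.List.enumerate (PySem.List.slice xs.toList none end_) 0).filter
      (fun p => decide (start ≤ p.1))).map
      (fun p => (p.1, (PySem.Int.ofStr? (String.singleton p.2)).getD 0))
  let highest := digits.foldl (fun a p => max a p.2) 0
  if highest = 0 then (0, -1)
  else (highest, (((digits.filter (fun p => p.2 = highest)).head?).map (·.1)).getD (-1))

-- ===== PRECONDITION & SPEC =====
-- Pre_ excludes exactly the inputs whose scanned region (index ≥ start, within xs[:end]) contains a
-- character that int() does not accept: Python A raises ValueError there.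
def Pre_find_highest (xs : String) (start : Int) (end_ : Option Int) : Prop :=
  ∀ p ∈ PySem.List.enumerate (PySem.List.slice xs.toList none end_) 0,
    start ≤ p.1 → (PySem.Int.ofStr? (String.singleton p.2)).isSome = true
instance (xs : String) (start : Int) (end_ : Option Int) : Decidable (Pre_find_highest xs start end_) := by unfold Pre_find_highest; infer_instance

def pvWitness_find_highest : String × Int × Option Int := ("a123", 1, some 3)

def Spec_find_highest (xs : String) (start : Int) (end_ : Option Int) (out : Int × Int) : Prop := out = find_highest_alt xs start end_
instance (xs : String) (start : Int) (end_ : Option Int) (out : Int × Int) : Decidable (Spec_find_highest xs start end_ out) := by unfold Spec_find_highest; infer_instance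

-- ===== CLAIM (what is proved, stated in full; the proofs are below) =====
def Claim_equal_find_highest : Prop := ∀ (xs : String) (start : Int) (end_ : Option Int), Dom_find_highest xs start end_ → Pre_find_highest xs start end_ → Spec_find_highest xs start end_ (find_highest xs start end_)

-- ===== LEMMAS AND PROOFS =====

-- abstract version of A's loop over (index, value) pairs
def pvFoldA : List (Int × Int) → Int × Int → Int × Int
  | [], st => st
  | (i, v) :: rest, st => pvFoldA rest (if v > st.1 then (v, i) else st)

theorem pv_le_foldl_max (ps : List (Int × Int)) (a : Int) :
    a ≤ ps.foldl (fun a p => max a p.2) a := by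
  induction ps generalizing a with
  | nil => simp
  | cons q rest ih => exact le_trans (le_max_left a q.2) (ih (max a q.2))

-- characterisation of A's fused scan: it computes the max and the first index attaining it
theorem pv_foldA_eq (ps : List (Int × Int)) (h idx : Int) :
    pvFoldA ps (h, idx) =
      (let m := ps.foldl (fun a p => max a p.2) h
       if h < m then (m, (((ps.filter (fun p => p.2 = m)).head?).map (·.1)).getD (-1))
       else (h, idx)) := by
  induction ps generalizing h idx with
  | nil => simp [pvFoldA]
  | cons q rest ih =>
    obtain ⟨i, v⟩ := q
    simp only [pvFoldA, List.foldl_cons]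
    by_cases hv : v > h
    · simp only [if_pos hv]
      rw [ih]
      have hmax : max h v = v := by omega
      simp only [hmax]
      have hm := pv_le_foldl_max rest v
      generalize hmdef : rest.foldl (fun a p => max a p.2) v = m at hm ⊢
      by_cases hvm : v < m
      · have hhm : h < m := by omega
        have hne : ¬ ((i, v).2 = m) := by simp; omega
        simp [hvm, hhm, hne]
      · have hvm' : v = m := by omega
        subst hvm'
        simp [hv, List.filter_cons]
    · simp only [if_neg hv]
      rw [ih]
      have hmax : max h v = h := by omega
      simp only [hmax]
      have hm := pv_le_foldl_max rest h
      generalize hmdef : rest.foldl (fun a p => max a p.2) h = m at hm ⊢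
      by_cases hhm : h < m
      · have hne : ¬ ((i, v).2 = m) := by simp; omega
        simp [hhm, hne]
      · simp [hhm]

-- under Pre_, A's concrete loop equals the abstract loop over the region's (index, digit) pairs
theorem pv_bridge (start : Int) (l : List (Int × Char)) (st : Int × Int)
    (hPre : ∀ p ∈ l, start ≤ p.1 → (PySem.Int.ofStr? (String.singleton p.2)).isSome = true) :
    l.foldl
      (fun (st : Int × Int) p =>
        if p.1 < start then st
        else
          match PySem.Int.ofStr? (String.singleton p.2) with
          | some v => if v > st.1 then (v, p.1) else st
          | none => st)
      st
    = pvFoldA ((l.filter (fun p => decide (start ≤ p.1))).map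
        (fun p => (p.1, (PySem.Int.ofStr? (String.singleton p.2)).getD 0))) st := by
  induction l generalizing st with
  | nil => simp [pvFoldA]
  | cons q rest ih =>
    obtain ⟨i, x⟩ := q
    by_cases hi : i < start
    · have : ¬ start ≤ i := by omega
      simp only [List.foldl_cons, List.filter_cons, if_pos hi, decide_eq_true_eq]
      rw [if_neg this]
      exact ih st (fun p hp h => hPre p (List.mem_cons_of_mem _ hp) h)
    · have hle : start ≤ i := by omega
      have hsome := hPre (i, x) (List.mem_cons_self) hle
      obtain ⟨v, hv⟩ := Option.isSome_iff_exists.mp hsome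
      simp only [List.foldl_cons, List.filter_cons, if_neg hi, decide_eq_true_eq, if_pos hle,
        List.map_cons, hv, Option.getD_some, pvFoldA]
      exact ih _ (fun p hp h => hPre p (List.mem_cons_of_mem _ hp) h)

-- ===== VERDICT (by name: the statement is the Claim_ definition above) =====
theorem find_highest_spec : Claim_equal_find_highest := by
  intro xs start end_ _ hPre
  unfold Spec_find_highest find_highest find_highest_alt
  rw [pv_bridge start _ _ hPre, pv_foldA_eq]
  dsimp only
  set ps := ((PySem.List.enumerate (PySem.List.slice xs.toList none end_) 0).filter
      (fun p => decide (start ≤ p.1))).map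
      (fun p => (p.1, (PySem.Int.ofStr? (String.singleton p.2)).getD 0)) with hps
  have h0 := pv_le_foldl_max ps 0
  set m := ps.foldl (fun a p => max a p.2) 0 with hm
  by_cases hzm : (0 : Int) < m
  · have hne : ¬ m = 0 := by omega
    simp [hzm, hne]
  · have hz : m = 0 := by omega
    simp [hz]
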